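-- pv_equiv track=rewrite | github.com/bdaene/ilemaths | chaine-de-caracteres-et-algo-885748.py | flight
-- ===== SOURCE A (Python) =====
-- def flight(s):
--     n, i = len(s), 0
--     z = ""
--     digits = set("0123456789")
--
--     while i < n:
--         j = i
--         while j < n and s[j] in digits:
--             j += 1
--         z += s[i:j]
--         i = j
--         while j < n and s[j] not in digits:
--             j += 1
--         z += ''.join(str(k) for k in range(1, j - i + 1))
--
--         if i < j:
--             i = j
--         else:
--             i += 1
--
--     return z
-- ===== SOURCE B (Python) =====
-- def flight(s):
--     out = []
--     k = 0
--     for c in s: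
--         if c in '0123456789':
--             k = 0
--             out.append(c)
--         else:
--             k += 1
--             out.append(str(k))
--     return ''.join(out)
-- ===== Notes on version B (the rewrite author's own statement) =====
-- stated objective: simpler
-- what changed: Replaced A's twin-pointer run scanning (find digit-run end, slice, find non-digit-run end, emit range 1..L) with a single per-character fold carrying a counter: a digit is copied and resets the counter, each non-digit appends the incremented counter's decimal string; no run boundaries or slices are ever computed.
import Mathlib
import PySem

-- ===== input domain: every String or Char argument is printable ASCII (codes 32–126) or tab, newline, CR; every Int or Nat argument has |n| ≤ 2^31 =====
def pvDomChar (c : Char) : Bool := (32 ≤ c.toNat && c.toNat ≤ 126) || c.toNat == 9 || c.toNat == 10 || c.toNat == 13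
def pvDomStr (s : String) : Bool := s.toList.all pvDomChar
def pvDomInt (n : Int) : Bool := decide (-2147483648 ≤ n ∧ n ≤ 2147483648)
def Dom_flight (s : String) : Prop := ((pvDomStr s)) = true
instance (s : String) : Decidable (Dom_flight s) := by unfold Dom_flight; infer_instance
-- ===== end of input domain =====

-- B replaces A's twin-pointer run scanning with a single per-character fold that
-- carries a counter (digits copy & reset it, non-digits emit its increment);
-- objective: simpler.

-- ===== PORT A =====
-- membership test `c in set("0123456789")` / `c in '0123456789'`: exact as
-- membership in the ten ASCII digit characters (both Pythons test the same set)
def isDig (c : Char) : Bool := "0123456789".toList.contains c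

-- ''.join(str(k) for k in range(1, L+1)) as a char list (A's per-run emission)
def numChars (L : Nat) : List Char :=
  ((PySem.List.pyRange 1 ((L : Int) + 1) 1).map (fun k => (PySem.Int.toStr k).toList)).flatten

-- one Python inner while loop `while j < n and [not] s[j] in digits: j += 1`
def scan (p : Char → Bool) (cs : List Char) (n j : Nat) : Nat :=
  if h : j < n ∧ p (cs.getD j ' ') then scan p cs n (j + 1) else j
termination_by n - j
decreasing_by omega

theorem scan_ge (p : Char → Bool) (cs : List Char) (n j : Nat) : j ≤ scan p cs n j := by
  fun_induction scan p cs n j with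
  | case1 j h ih => omega
  | case2 j h => omega

-- the outer while loop of A, z the accumulated output as chars
-- (z += s[i:j]; i = j; z += join(...): the two appends are kept in order)
def loopA (cs : List Char) (n i : Nat) (z : List Char) : List Char :=
  if _h : i < n then
    if _hb : scan isDig cs n i < scan (fun c => !isDig c) cs n (scan isDig cs n i) then
      loopA cs n (scan (fun c => !isDig c) cs n (scan isDig cs n i))
        (z ++ (cs.drop i).take (scan isDig cs n i - i)
           ++ numChars (scan (fun c => !isDig c) cs n (scan isDig cs n i) - scan isDig cs n i))
    else
      loopA cs n (scan isDig cs n i + 1)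
        (z ++ (cs.drop i).take (scan isDig cs n i - i)
           ++ numChars (scan (fun c => !isDig c) cs n (scan isDig cs n i) - scan isDig cs n i))
  else z
termination_by n - i
decreasing_by
  · have h1 := scan_ge isDig cs n i
    omega
  · have h1 := scan_ge isDig cs n i
    omega

def flight (s : String) : String :=
  String.ofList (loopA s.toList s.toList.length 0 [])

-- ===== PORT B =====
-- one step of Source B's for-loop: state = (counter k, accumulated output chars)
def stepB (st : Nat × List Char) (c : Char) : Nat × List Char :=
  if isDig c then (0, st.2 ++ [c])
  else (st.1 + 1, st.2 ++ PySem.Int.toChars ((st.1 : Int) + 1))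

def flight_alt (s : String) : String :=
  String.ofList ((s.toList.foldl stepB (0, [])).2)

-- ===== PRECONDITION & SPEC =====
def Spec_flight (s : String) (out : String) : Prop := out = flight_alt s
instance (s : String) (out : String) : Decidable (Spec_flight s out) := by unfold Spec_flight; infer_instance

-- ===== CLAIM (what is proved, stated in full; the proofs are below) =====
def Claim_equal_flight : Prop := ∀ (s : String), Dom_flight s → Spec_flight s (flight s)

-- ===== LEMMAS AND PROOFS =====

-- proof-only middle form: the run decomposition both programs realise
def groupsB : List Char → List (Bool × List Char)
  | [] => []
  | c :: rest =>
    (isDig c, c :: rest.takeWhile (fun d => isDig d == isDig c)) ::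
      groupsB (rest.dropWhile (fun d => isDig d == isDig c))
termination_by l => l.length
decreasing_by
  have := List.length_dropWhile_le (fun d => isDig d == isDig c) rest
  simp; omega

def procB (l : List Char) : List Char :=
  (groupsB l).flatMap (fun g => if g.1 then g.2 else numChars g.2.length)

theorem takeWhile_congr' {p q : Char → Bool} {l : List Char} (h : ∀ x ∈ l, p x = q x) :
    l.takeWhile p = l.takeWhile q := by
  induction l with
  | nil => rfl
  | cons a t ih =>
    simp only [List.takeWhile_cons, h a (by simp)]
    cases hq : q a <;> simp [ih (fun x hx => h x (by simp [hx]))]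

theorem dropWhile_congr' {p q : Char → Bool} {l : List Char} (h : ∀ x ∈ l, p x = q x) :
    l.dropWhile p = l.dropWhile q := by
  induction l with
  | nil => rfl
  | cons a t ih =>
    simp only [List.dropWhile_cons, h a (by simp)]
    cases hq : q a <;> simp [ih (fun x hx => h x (by simp [hx]))]

theorem length_takeWhile_le' (p : Char → Bool) (l : List Char) :
    (l.takeWhile p).length ≤ l.length := by
  simpa using (List.takeWhile_prefix (p := p) (l := l)).length_le

theorem dropWhile_eq_drop_len (p : Char → Bool) (l : List Char) :
    l.dropWhile p = l.drop (l.takeWhile p).length := by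
  calc l.dropWhile p
      = ((l.takeWhile p) ++ (l.dropWhile p)).drop (l.takeWhile p).length := by
        rw [List.drop_left]
    _ = l.drop (l.takeWhile p).length := by rw [List.takeWhile_append_dropWhile]

theorem scan_eq (p : Char → Bool) (cs : List Char) (j : Nat) (hj : j ≤ cs.length) :
    scan p cs cs.length j = j + ((cs.drop j).takeWhile p).length := by
  fun_induction scan p cs cs.length j with
  | case1 j h ih =>
    obtain ⟨hlt, hp⟩ := h
    have hd : cs.drop j = cs[j] :: cs.drop (j + 1) := List.drop_eq_getElem_cons hlt
    have hg : cs.getD j ' ' = cs[j] := List.getD_eq_getElem cs ' ' hlt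
    rw [hd, List.takeWhile_cons, ← hg, hp, ih (by omega)]
    simp; omega
  | case2 j h =>
    by_cases hlt : j < cs.length
    · have hd : cs.drop j = cs[j] :: cs.drop (j + 1) := List.drop_eq_getElem_cons hlt
      have hg : cs.getD j ' ' = cs[j] := List.getD_eq_getElem cs ' ' hlt
      have hp : p cs[j] = false := by
        rw [← hg]; by_contra hc; exact h ⟨hlt, by simpa using hc⟩
      rw [hd, List.takeWhile_cons, hp]; simp
    · have : cs.drop j = [] := List.drop_eq_nil_of_le (by omega)
      simp [this]

theorem numChars_zero : numChars 0 = [] := by decide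

theorem groupsB_nil : groupsB [] = [] := by rw [groupsB.eq_def]

theorem groupsB_cons (c : Char) (rest : List Char) :
    groupsB (c :: rest) =
      (isDig c, c :: rest.takeWhile (fun d => isDig d == isDig c)) ::
        groupsB (rest.dropWhile (fun d => isDig d == isDig c)) := by
  rw [groupsB.eq_def]

theorem procB_nil' : procB [] = [] := by rw [procB, groupsB_nil]; rfl

theorem procB_cons (c : Char) (rest : List Char) :
    procB (c :: rest) =
      (if isDig c then c :: rest.takeWhile (fun d => isDig d == isDig c)
       else numChars (c :: rest.takeWhile (fun d => isDig d == isDig c)).length)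
        ++ procB (rest.dropWhile (fun d => isDig d == isDig c)) := by
  rw [procB, groupsB_cons, List.flatMap_cons, ← procB]

-- one non-digit (or empty) step of B
theorem procB_step_nd (l : List Char) (hl : ∀ h ∈ l.head?, isDig h = false) :
    procB l = numChars (l.takeWhile (fun c => !isDig c)).length
      ++ procB (l.dropWhile (fun c => !isDig c)) := by
  cases l with
  | nil => simp [procB_nil', numChars_zero]
  | cons c rest =>
    have hc : isDig c = false := hl c (by simp)
    rw [procB_cons, List.takeWhile_cons, List.dropWhile_cons]
    simp only [hc, Bool.not_false, if_true, Bool.false_eq_true, if_false]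
    have htw : rest.takeWhile (fun d => isDig d == false)
        = rest.takeWhile (fun c => !isDig c) := by
      apply takeWhile_congr'; intro x _; simp
    have hdw : rest.dropWhile (fun d => isDig d == false)
        = rest.dropWhile (fun c => !isDig c) := by
      apply dropWhile_congr'; intro x _; simp
    rw [htw, hdw]

-- one full iteration of A's outer loop matches the run decomposition
theorem procB_step (l : List Char) :
    procB l = l.takeWhile isDig
      ++ numChars ((l.dropWhile isDig).takeWhile (fun c => !isDig c)).length
      ++ procB ((l.dropWhile isDig).dropWhile (fun c => !isDig c)) := by
  cases l with
  | nil => simp [procB_nil', numChars_zero]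
  | cons c rest =>
    by_cases hdig : isDig c
    · rw [procB_cons, List.takeWhile_cons, List.dropWhile_cons]
      simp only [hdig, if_true]
      have htw : rest.takeWhile (fun d => isDig d == true)
          = rest.takeWhile isDig := by
        apply takeWhile_congr'; intro x _; simp
      have hdw : rest.dropWhile (fun d => isDig d == true)
          = rest.dropWhile isDig := by
        apply dropWhile_congr'; intro x _; simp
      rw [htw, hdw, procB_step_nd (rest.dropWhile isDig) ?_]
      · simp
      · intro h hh
        have := List.head?_dropWhile_not isDig rest
        rw [hh] at this; simpa using this
    · have hc : isDig c = false := by simpa using hdig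
      rw [List.takeWhile_cons, List.dropWhile_cons]
      simp only [hc, Bool.false_eq_true, if_false]
      exact procB_step_nd (c :: rest) (by intro h hh; simp at hh; exact hh ▸ hc)

theorem loopA_eq_aux (cs : List Char) (k : Nat) : ∀ i z, cs.length - i ≤ k → i ≤ cs.length →
    loopA cs cs.length i z = z ++ procB (cs.drop i) := by
  induction k with
  | zero =>
    intro i z hk hi
    rw [loopA, dif_neg (by omega)]
    rw [List.drop_eq_nil_of_le (by omega), procB_nil', List.append_nil]
  | succ k ih =>
    intro i z hk hi
    by_cases hlt : i < cs.length
    · rw [loopA, dif_pos hlt]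
      set j := scan isDig cs cs.length i with hjdef
      set j2 := scan (fun c => !isDig c) cs cs.length j with hj2def
      have hsD : j = i + ((cs.drop i).takeWhile isDig).length := scan_eq isDig cs i hi
      have hji : i ≤ j := scan_ge isDig cs cs.length i
      have hjlen : j ≤ cs.length := by
        have h1 := length_takeWhile_le' isDig (cs.drop i)
        simp at h1; omega
      have hsN : j2 = j + ((cs.drop j).takeWhile (fun c => !isDig c)).length :=
        scan_eq _ cs j hjlen
      have hjj2 : j ≤ j2 := scan_ge _ cs cs.length j
      have hj2len : j2 ≤ cs.length := by
        have h1 := length_takeWhile_le' (fun c => !isDig c) (cs.drop j)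
        simp at h1; omega
      have hdropj : cs.drop j = (cs.drop i).dropWhile isDig := by
        rw [dropWhile_eq_drop_len, List.drop_drop, ← hsD]
      have hdropj2 : cs.drop j2 = (cs.drop j).dropWhile (fun c => !isDig c) := by
        rw [dropWhile_eq_drop_len, List.drop_drop, ← hsN]
      have hslice : (cs.drop i).take (j - i) = (cs.drop i).takeWhile isDig := by
        have hpre := List.takeWhile_prefix (l := cs.drop i) (p := isDig)
        have h1 := List.prefix_iff_eq_take.mp hpre
        rw [hsD]; simpa using h1.symm
      have hnum : j2 - j
          = (((cs.drop i).dropWhile isDig).takeWhile (fun c => !isDig c)).length := by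
        rw [← hdropj]; omega
      by_cases hb : j < j2
      · rw [dif_pos hb, ih j2 _ (by omega) hj2len]
        rw [hdropj2, hdropj, hslice, hnum, procB_step (cs.drop i)]
        simp
      · rw [dif_neg hb]
        have hj2j : j2 = j := by omega
        have hjn : j = cs.length := by
          rcases hrest : cs.drop j with _ | ⟨c2, rest2⟩
          · have h1 := List.drop_eq_nil_iff.mp hrest; omega
          · exfalso
            have hc2 : isDig c2 = false := by
              have h1 := List.head?_dropWhile_not isDig (cs.drop i)
              rw [← hdropj, hrest] at h1; simpa using h1
            have : 1 ≤ ((cs.drop j).takeWhile (fun c => !isDig c)).length := by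
              rw [hrest, List.takeWhile_cons, hc2]; simp
            omega
        rw [loopA, dif_neg (by omega)]
        have hrest0 : (cs.drop i).dropWhile isDig = [] := by
          rw [← hdropj]; exact List.drop_eq_nil_of_le (by omega)
        rw [hslice, hnum, procB_step (cs.drop i), hrest0]
        simp [procB_nil', numChars_zero]
    · rw [loopA, dif_neg hlt]
      rw [List.drop_eq_nil_of_le (by omega), procB_nil', List.append_nil]

-- B-side: the counter-fold also realises the run decomposition
-- emit k L = str(k+1) ++ str(k+2) ++ … ++ str(k+L)
def emit (k : Nat) : Nat → List Char
  | 0 => []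
  | L + 1 => PySem.Int.toChars ((k : Int) + 1) ++ emit (k + 1) L

theorem emit_eq_range (k L : Nat) :
    emit k L = ((PySem.List.pyRange ((k : Int) + 1) ((k : Int) + (L : Int) + 1) 1).map
      (fun j => (PySem.Int.toStr j).toList)).flatten := by
  induction L generalizing k with
  | zero =>
    rw [PySem.List.pyRange_one_eq_nil (by omega)]; rfl
  | succ L ih =>
    rw [emit, PySem.List.pyRange_one_cons (by push_cast; omega), List.map_cons,
      List.flatten_cons, ih (k + 1)]
    congr 2
    · rw [PySem.Int.toList_toStr]
    · have h1 : (k : Int) + 1 + 1 = ((k + 1 : Nat) : Int) + 1 := by push_cast; ring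
      have h2 : (k : Int) + ((L + 1 : Nat) : Int) + 1 = ((k + 1 : Nat) : Int) + (L : Int) + 1 := by
        push_cast; ring
      rw [h1, h2]

theorem numChars_eq_emit (L : Nat) : numChars L = emit 0 L := by
  rw [numChars, emit_eq_range]; norm_num

-- fold over an all-digit run: chars copied, counter reset (or kept if empty)
theorem fold_digit_run (d : List Char) (hd : ∀ c ∈ d, isDig c = true) (k : Nat) (z : List Char) :
    d.foldl stepB (k, z) = (if d.isEmpty then k else 0, z ++ d) := by
  induction d generalizing k z with
  | nil => simp
  | cons c t ih =>
    rw [List.foldl_cons, stepB, if_pos (hd c (by simp))]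
    rw [ih (fun x hx => hd x (by simp [hx]))]
    cases t <;> simp

-- fold over an all-non-digit run: counter walk emits str(k+1)…str(k+L)
theorem fold_nd_run (m : List Char) (hm : ∀ c ∈ m, isDig c = false) (k : Nat) (z : List Char) :
    m.foldl stepB (k, z) = (k + m.length, z ++ emit k m.length) := by
  induction m generalizing k z with
  | nil => simp [emit]
  | cons c t ih =>
    rw [List.foldl_cons, stepB, if_neg (by simp [hm c (by simp)])]
    rw [ih (fun x hx => hm x (by simp [hx]))]
    simp [emit]; omega

-- counter is irrelevant when the next char (if any) is a digit
theorem fold_counter_irrel (l : List Char) (hl : ∀ h ∈ l.head?, isDig h = true)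
    (k k' : Nat) (z : List Char) : (l.foldl stepB (k, z)).2 = (l.foldl stepB (k', z)).2 := by
  cases l with
  | nil => rfl
  | cons c t =>
    have hc : isDig c = true := hl c (by simp)
    rw [List.foldl_cons, List.foldl_cons, stepB, stepB, if_pos hc, if_pos hc]

theorem foldB_eq_procB (n : Nat) : ∀ cs : List Char, cs.length ≤ n → ∀ z : List Char,
    (cs.foldl stepB (0, z)).2 = z ++ procB cs := by
  induction n with
  | zero =>
    intro cs hn z
    have : cs = [] := List.eq_nil_of_length_eq_zero (by omega)
    subst this; simp [procB_nil']
  | succ n ih =>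
    intro cs hn z
    rcases hcs : cs with _ | ⟨c0, rest0⟩
    · simp [procB_nil']
    rw [← hcs]
    set d := cs.takeWhile isDig with hd
    set r := cs.dropWhile isDig with hr
    set m := r.takeWhile (fun c => !isDig c) with hm
    set rest := r.dropWhile (fun c => !isDig c) with hrest
    have hsplit1 : cs = d ++ r := (List.takeWhile_append_dropWhile).symm
    have hsplit2 : r = m ++ rest := (List.takeWhile_append_dropWhile).symm
    have hdall : ∀ c ∈ d, isDig c = true := fun c hc => List.mem_takeWhile_imp hc
    have hmall : ∀ c ∈ m, isDig c = false := by
      intro c hc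
      have := List.mem_takeWhile_imp hc
      simpa using this
    have hresthead : ∀ h ∈ rest.head?, isDig h = true := by
      intro h hh
      have := List.head?_dropWhile_not (fun c => !isDig c) r
      rw [← hrest, hh] at this; simpa using this
    have hlen : d.length + m.length + rest.length = cs.length := by
      rw [hsplit1, hsplit2]; simp; omega
    have hpos : 1 ≤ d.length + m.length := by
      by_cases hc0 : isDig c0
      · have hde : d = c0 :: rest0.takeWhile isDig := by
          rw [hd, hcs, List.takeWhile_cons, if_pos hc0]
        rw [hde]; simp; omega
      · have hd0 : d = [] := by
          rw [hd, hcs, List.takeWhile_cons, if_neg hc0]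
        have hr0 : r = c0 :: rest0 := by
          rw [hr, hcs, List.dropWhile_cons, if_neg hc0]
        have hme : m = c0 :: rest0.takeWhile (fun c => !isDig c) := by
          rw [hm, hr0, List.takeWhile_cons, if_pos (by simp [hc0])]
        rw [hme]; simp; omega
    calc (cs.foldl stepB (0, z)).2
        = ((d ++ (m ++ rest)).foldl stepB (0, z)).2 := by rw [← hsplit2, ← hsplit1]
      _ = ((m ++ rest).foldl stepB (d.foldl stepB (0, z)) ).2 := by rw [List.foldl_append]
      _ = ((m ++ rest).foldl stepB (0, z ++ d)).2 := by
          rw [fold_digit_run d hdall 0 z]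
          cases d <;> simp
      _ = (rest.foldl stepB (m.length, z ++ d ++ emit 0 m.length)).2 := by
          rw [List.foldl_append, fold_nd_run m hmall 0 (z ++ d)]; simp
      _ = (rest.foldl stepB (0, z ++ d ++ emit 0 m.length)).2 :=
          fold_counter_irrel rest hresthead _ 0 _
      _ = z ++ d ++ emit 0 m.length ++ procB rest := by
          apply ih rest (by omega)
      _ = z ++ procB cs := by
          rw [procB_step cs, ← hd, ← hr, ← hm, ← hrest, numChars_eq_emit]
          simp

-- ===== VERDICT (by name: the statement is the Claim_ definition above) =====
theorem flight_spec : Claim_equal_flight := by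
  intro s _
  unfold Spec_flight flight flight_alt
  rw [loopA_eq_aux s.toList s.toList.length 0 [] (by omega) (by omega)]
  rw [foldB_eq_procB s.toList.length s.toList (le_refl _) []]
  simp
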